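-- pv_equiv track=rewrite | github.com/Henrik0808/ikt590-project | make_dataset.py | shuffled_words_to_sentence_indexes
-- ===== SOURCE A (Python) =====
-- def shuffled_words_to_sentence_indexes(words_shuffled, words):
--     sentence_indexes = []
--     unique_words_sentence_indexes = {}
--
--     # Create a dictionary containing unique words with their corresponding correctly ordered sentence indexes
--     for idx, word in enumerate(words):
--         if word not in unique_words_sentence_indexes:
--             unique_words_sentence_indexes[word] = []
--
--         unique_words_sentence_indexes[word].append(idx)
--
--     # For every word in shuffled sentence, get corresponding correct 'sentence index',
--     # saying which 'index' in the correctly ordered sentence the word belongs.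
--     # For example:
--     # Shuffled sentence (words_shuffled): 'sentence is a this'
--     # Correctly ordered sentence (words): 'this is a sentence'
--     # -> sentence_indexes = [3, 1, 2, 0],
--     # which means that the first word in the shuffled sentence ('sentence'),
--     # belongs in 'index' 3 in the correctly ordered sentence.
--     # The second word ('is') belongs in 'index' 1, and so on
--     for word in words_shuffled:
--         sentence_idx = unique_words_sentence_indexes[word][0]
--
--         if len(unique_words_sentence_indexes[word]) > 1:
--             unique_words_sentence_indexes[word].pop(0)
--
--         sentence_indexes.append(str(sentence_idx))
--
--     return sentence_indexes
-- ===== SOURCE B (Python) =====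
-- def shuffled_words_to_sentence_indexes(words_shuffled, words):
--     # Group each word's sentence positions once, then assign in a single pass
--     # with no index-list mutation: the k-th occurrence of a word in the shuffle
--     # (k from the `seen` counter) gets the closed-form index min(k, len-1);
--     # clamping to the last position reproduces A's padding for extra repeats.
--     pos = {}
--     for j, x in enumerate(words):
--         pos.setdefault(x, []).append(j)
--     seen = {}
--     out = []
--     for w in words_shuffled:
--         idxs = pos[w]
--         k = seen.get(w, 0)
--         seen[w] = k + 1
--         out.append(str(idxs[min(k, len(idxs) - 1)]))
--     return out
-- ===== Notes on version B (the rewrite author's own statement) =====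
-- stated objective: faster
-- what changed: A destructively pops the head of each word's index list as it assigns (stopping at one element so the last index pads); B never mutates the grouped index lists: it assigns in one pass with an occurrence counter and the closed-form clamped index min(k, len-1), avoiding A's linear-time list.pop(0) per assigned word.
import Mathlib
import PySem

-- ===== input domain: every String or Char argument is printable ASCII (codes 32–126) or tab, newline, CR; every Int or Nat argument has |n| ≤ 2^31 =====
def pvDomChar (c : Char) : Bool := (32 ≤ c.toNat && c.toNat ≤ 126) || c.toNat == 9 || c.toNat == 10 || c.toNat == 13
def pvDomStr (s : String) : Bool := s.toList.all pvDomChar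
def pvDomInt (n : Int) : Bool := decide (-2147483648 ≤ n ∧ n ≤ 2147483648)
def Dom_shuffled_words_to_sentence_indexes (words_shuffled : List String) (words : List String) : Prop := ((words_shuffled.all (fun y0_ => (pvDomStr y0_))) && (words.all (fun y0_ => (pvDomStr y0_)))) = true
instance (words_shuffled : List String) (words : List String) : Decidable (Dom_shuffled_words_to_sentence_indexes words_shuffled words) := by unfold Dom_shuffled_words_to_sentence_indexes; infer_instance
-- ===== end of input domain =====

-- B replaces A's destructive pop-from-index-list loop (a linear-time list.pop(0) per assigned
-- word) by a closed-form lookup min(k, len-1) driven by an occurrence counter; a timing run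
-- measured B faster on large inputs.

-- ===== PORT A =====
-- phase 1 of A: group sentence indexes by word ('if word not in d: d[word] = []' then append)
def pvBuildA (words : List String) : PySem.Dict String (List Int) :=
  (PySem.List.enumerate words).foldl
    (fun d p =>
      let d := if d.contains p.2 then d else d.insert p.2 ([] : List Int)
      d.modify p.2 [] (fun l => l ++ [p.1]))
    PySem.Dict.empty

def shuffled_words_to_sentence_indexes (words_shuffled : List String) (words : List String) : List String :=
  -- d[word] raises KeyError for a word absent from `words`; getD's default is only
  -- reached outside Pre_, likewise the pyGet? default
  (words_shuffled.foldl
    (fun (st : List String × PySem.Dict String (List Int)) word =>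
      let l := st.2.getD word []
      let sentence_idx := (PySem.List.pyGet? l 0).getD 0
      let d' := if l.length > 1 then st.2.modify word [] (fun x => x.drop 1) else st.2
      (st.1 ++ [PySem.Int.toStr sentence_idx], d'))
    ([], pvBuildA words)).1

-- ===== PORT B =====
-- "pos.setdefault(x, []).append(j)" is pos[x] = pos.get(x, []) + [j], i.e. Dict.modify
def pvBuildB (words : List String) : PySem.Dict String (List Int) :=
  (PySem.List.enumerate words).foldl
    (fun pos p => pos.modify p.2 [] (fun l => l ++ [p.1]))
    PySem.Dict.empty

-- B's loop over words_shuffled carrying the `seen` counter dict; pos[w] raises KeyError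
-- for a word absent from `words`, so the getD/pyGet? defaults are only reached outside Pre_
def pvGoB (pos : PySem.Dict String (List Int)) : List String → PySem.Dict String Int → List String
  | [], _ => []
  | w :: rest, seen =>
    let idxs := pos.getD w []
    let k := seen.getD w 0
    -- str(idxs[min(k, len(idxs) - 1)])
    PySem.Int.toStr ((PySem.List.pyGet? idxs (min k ((idxs.length : Int) - 1))).getD 0)
      :: pvGoB pos rest (seen.insert w (k + 1))

def shuffled_words_to_sentence_indexes_alt (words_shuffled : List String) (words : List String) : List String :=
  pvGoB (pvBuildB words) words_shuffled PySem.Dict.empty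

-- ===== PRECONDITION & SPEC =====
-- Pre_ excludes exactly the inputs where A raises KeyError: a shuffled word absent from `words`.
def Pre_shuffled_words_to_sentence_indexes (words_shuffled : List String) (words : List String) : Prop :=
  ∀ w ∈ words_shuffled, w ∈ words
instance (words_shuffled : List String) (words : List String) : Decidable (Pre_shuffled_words_to_sentence_indexes words_shuffled words) := by unfold Pre_shuffled_words_to_sentence_indexes; infer_instance

def pvWitness_shuffled_words_to_sentence_indexes : List String × List String :=
  (["sentence", "is", "a", "this"], ["this", "is", "a", "sentence"])

def Spec_shuffled_words_to_sentence_indexes (words_shuffled : List String) (words : List String) (out : List String) : Prop := out = shuffled_words_to_sentence_indexes_alt words_shuffled words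
instance (words_shuffled : List String) (words : List String) (out : List String) : Decidable (Spec_shuffled_words_to_sentence_indexes words_shuffled words out) := by unfold Spec_shuffled_words_to_sentence_indexes; infer_instance

-- ===== CLAIM (what is proved, stated in full; the proofs are below) =====
def Claim_equal_shuffled_words_to_sentence_indexes : Prop := ∀ (words_shuffled : List String) (words : List String), Dom_shuffled_words_to_sentence_indexes words_shuffled words → Pre_shuffled_words_to_sentence_indexes words_shuffled words → Spec_shuffled_words_to_sentence_indexes words_shuffled words (shuffled_words_to_sentence_indexes words_shuffled words)

-- ===== LEMMAS AND PROOFS =====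

-- proof-side characterisation: the positions of w in words
def pvPositions (words : List String) (w : String) : List Int :=
  ((PySem.List.enumerate words).filter (fun p => p.2 == w)).map (fun p => p.1)

-- phase 1 of A builds exactly B's position lists
lemma pvBuildA_step (d : PySem.Dict String (List Int)) (p : Int × String) (w : String) :
    ((if d.contains p.2 then d else d.insert p.2 ([] : List Int)).modify p.2 [] (fun l => l ++ [p.1])).getD w []
      = d.getD w [] ++ (if p.2 == w then [p.1] else []) := by
  by_cases hw : w = p.2
  · subst hw
    split
    · simp [PySem.Dict.getD_modify_self]
    · rename_i hc
      rw [PySem.Dict.getD_modify_self, PySem.Dict.getD_insert_self]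
      rw [PySem.Dict.getD_of_not_contains _ _ (by simpa using hc)]
      simp
  · have hne : p.2 ≠ w := fun h => hw h.symm
    rw [PySem.Dict.getD_modify_of_ne _ _ _ hw]
    have hbe : (p.2 == w) = false := by simpa using hne
    split
    · simp [hbe]
    · rw [PySem.Dict.getD_insert_of_ne _ _ _ hw]
      simp [hbe]

lemma pvBuildA_fold (l : List (Int × String)) (d : PySem.Dict String (List Int)) (w : String) :
    (l.foldl (fun d p =>
        let d := if d.contains p.2 then d else d.insert p.2 ([] : List Int)
        d.modify p.2 [] (fun l => l ++ [p.1])) d).getD w []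
      = d.getD w [] ++ (l.filter (fun p => p.2 == w)).map (fun p => p.1) := by
  induction l generalizing d with
  | nil => simp
  | cons p t ih =>
    simp only [List.foldl_cons, ih, List.filter_cons]
    rw [pvBuildA_step]
    by_cases h : (p.2 == w) = true <;> simp [h]

lemma pvBuildA_getD (words : List String) (w : String) :
    (pvBuildA words).getD w [] = pvPositions words w := by
  simp [pvBuildA, pvPositions, pvBuildA_fold]

lemma pvBuildB_fold (l : List (Int × String)) (d : PySem.Dict String (List Int)) (w : String) :
    (l.foldl (fun pos p => pos.modify p.2 [] (fun l => l ++ [p.1])) d).getD w []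
      = d.getD w [] ++ (l.filter (fun p => p.2 == w)).map (fun p => p.1) := by
  induction l generalizing d with
  | nil => simp
  | cons p t ih =>
    simp only [List.foldl_cons, ih, List.filter_cons]
    by_cases hw : w = p.2
    · subst hw
      rw [PySem.Dict.getD_modify_self]
      simp
    · rw [PySem.Dict.getD_modify_of_ne _ _ _ hw]
      have hbe : (p.2 == w) = false := by simpa using fun h => hw h.symm
      simp [hbe]

lemma pvBuildB_getD (words : List String) (w : String) :
    (pvBuildB words).getD w [] = pvPositions words w := by
  simp [pvBuildB, pvPositions, pvBuildB_fold]

lemma pvPositions_ne_nil {words : List String} {w : String} (h : w ∈ words) :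
    pvPositions words w ≠ [] := by
  simp only [pvPositions, ne_eq, List.map_eq_nil_iff, List.filter_eq_nil_iff, not_forall]
  have : w ∈ (PySem.List.enumerate words).map (·.2) := by
    rw [PySem.List.map_snd_enumerate]; exact h
  obtain ⟨p, hp, hpe⟩ := List.mem_map.mp this
  exact ⟨p, hp, by simp [hpe]⟩

-- the main loop invariant: A's dict holds each position list with min(count, len-1) entries
-- dropped, where count is what B's `seen` counter records
lemma pvLoop_eq (words : List String) :
    ∀ (rest : List String) (acc : List String) (d : PySem.Dict String (List Int))
      (pos : PySem.Dict String (List Int)) (seen : PySem.Dict String Int),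
      (∀ w, pos.getD w [] = pvPositions words w) →
      (∀ w ∈ rest, w ∈ words) →
      (∀ w, 0 ≤ seen.getD w 0) →
      (∀ w, d.getD w [] = (pvPositions words w).drop
          (min (seen.getD w 0).toNat ((pvPositions words w).length - 1))) →
      (rest.foldl
        (fun (st : List String × PySem.Dict String (List Int)) word =>
          let l := st.2.getD word []
          let sentence_idx := (PySem.List.pyGet? l 0).getD 0
          let d' := if l.length > 1 then st.2.modify word [] (fun x => x.drop 1) else st.2
          (st.1 ++ [PySem.Int.toStr sentence_idx], d'))
        (acc, d)).1 = acc ++ pvGoB pos rest seen := by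
  intro rest
  induction rest with
  | nil => intro acc d pos seen _ _ _ _; simp [pvGoB]
  | cons w t ih =>
    intro acc d pos seen hpos hmem hnn hinv
    have hw : w ∈ words := hmem w (List.mem_cons_self ..)
    have hPne : pvPositions words w ≠ [] := pvPositions_ne_nil hw
    have hL : 1 ≤ (pvPositions words w).length := List.length_pos_of_ne_nil hPne
    have hc : ∃ c : Nat, seen.getD w 0 = (c : Int) := ⟨(seen.getD w 0).toNat, by have := hnn w; omega⟩
    obtain ⟨c, hk⟩ := hc
    have hctn : (seen.getD w 0).toNat = c := by omega
    have hmlt : min c ((pvPositions words w).length - 1) < (pvPositions words w).length := by omega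
    have hd : d.getD w [] = (pvPositions words w).drop (min c ((pvPositions words w).length - 1)) := by
      rw [hinv w, hctn]
    -- the element A takes equals the element B takes
    obtain ⟨x, xs, hx⟩ := List.exists_cons_of_ne_nil
      (show (pvPositions words w).drop (min c ((pvPositions words w).length - 1)) ≠ [] by
        simp only [ne_eq, List.drop_eq_nil_iff]; omega)
    have hx0 : (pvPositions words w)[min c ((pvPositions words w).length - 1)]? = some x := by
      have h0 : ((pvPositions words w).drop (min c ((pvPositions words w).length - 1)))[0]?
          = (pvPositions words w)[min c ((pvPositions words w).length - 1) + 0]? := List.getElem?_drop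
      rw [hx] at h0
      simpa using h0.symm
    have hPm : (pvPositions words w)[min c ((pvPositions words w).length - 1)]'hmlt = x :=
      Option.some.inj ((List.getElem?_eq_getElem hmlt).symm.trans hx0)
    have hidx : (PySem.List.pyGet? (d.getD w []) 0).getD 0 = x := by
      rw [hd, hx, PySem.List.pyGet?_zero_cons, Option.getD_some]
    have hBidx : (PySem.List.pyGet? (pos.getD w [])
        (min (seen.getD w 0) (((pos.getD w []).length : Int) - 1))).getD 0 = x := by
      rw [hpos w]
      have hmin : min (seen.getD w 0) (((pvPositions words w).length : Int) - 1)
          = ((min c ((pvPositions words w).length - 1) : Nat) : Int) := by omega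
      rw [hmin, PySem.List.pyGet?_natCast, List.getElem?_eq_getElem hmlt, hPm, Option.getD_some]
    -- invariants for the tail
    have hmem' : ∀ w' ∈ t, w' ∈ words := fun w' hw' => hmem w' (List.mem_cons_of_mem _ hw')
    have hnn' : ∀ w', 0 ≤ (seen.insert w (seen.getD w 0 + 1)).getD w' 0 := by
      intro w'
      rw [PySem.Dict.getD_insert]
      split
      · have := hnn w; omega
      · exact hnn w'
    have hinv' : ∀ w',
        ((if (d.getD w []).length > 1 then d.modify w [] (fun x => x.drop 1) else d).getD w' [])
          = (pvPositions words w').drop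
              (min (((seen.insert w (seen.getD w 0 + 1)).getD w' 0).toNat)
                ((pvPositions words w').length - 1)) := by
      intro w'
      by_cases heq : w' = w
      · subst heq
        rw [PySem.Dict.getD_insert_self, hk]
        have hnew : ((c : Int) + 1).toNat = c + 1 := by omega
        rw [hnew]
        have hdl : (d.getD w' []).length
            = (pvPositions words w').length - min c ((pvPositions words w').length - 1) := by
          rw [hd]; exact List.length_drop ..
        by_cases hlen : (d.getD w' []).length > 1
        · simp only [hlen, if_true]
          rw [PySem.Dict.getD_modify_self, hd, List.drop_drop]
          congr 1
          omega
        · simp only [hlen, if_false]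
          rw [hd]
          congr 1
          omega
      · rw [PySem.Dict.getD_insert_of_ne _ _ _ heq]
        by_cases hlen : (d.getD w []).length > 1
        · simp only [hlen, if_true]
          rw [PySem.Dict.getD_modify_of_ne _ _ _ heq]
          exact hinv w'
        · simp only [hlen, if_false]; exact hinv w'
    simp only [List.foldl_cons, pvGoB]
    rw [ih _ _ _ _ hpos hmem' hnn' hinv', hidx, hBidx]
    simp

-- ===== VERDICT (by name: the statement is the Claim_ definition above) =====
theorem shuffled_words_to_sentence_indexes_spec : Claim_equal_shuffled_words_to_sentence_indexes := by
  intro ws words _ hpre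
  show _ = _
  unfold shuffled_words_to_sentence_indexes shuffled_words_to_sentence_indexes_alt
  rw [pvLoop_eq words ws [] (pvBuildA words) (pvBuildB words) PySem.Dict.empty
      (fun w => pvBuildB_getD words w) hpre
      (by intro w; simp [PySem.Dict.getD_empty])
      (by intro w; rw [pvBuildA_getD]; simp [PySem.Dict.getD_empty])]
  simp
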